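-- pv_equiv track=rewrite | github.com/dataplan-hrc/dataplan-hrc.github.io | H4_code/multiple_noise.py | clear_pickput
-- ===== SOURCE A (Python) =====
-- def clear_pickput(pick_put):
--
--     while True:
--
--         def find_count(pick_put):
--             count = []
--             q = 0
--
--             for p in pick_put:
--                 s=0
--                 for pp in pick_put:
--                     if p[0]==pp[0] and p[1]==pp[1]:
--                         s+=1
--                 count.append(s)
--
--             for i in range(len(count)):
--                 if count[i]>1:
--                     q+=1
--                     break
--
--             return count, q
--
--         count, q = find_count(pick_put)
--
--         for i in range(len(count)):
--             if count[i]>1: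
--                 pick_put.pop(i)
--                 break
--
--         count, q = find_count(pick_put)
--
--         if q<1:
--             break
--
--     return pick_put
-- ===== SOURCE B (Python) =====
-- def clear_pickput(pick_put):
--     # One backward pass: keep the last occurrence of each (p[0], p[1]) key.
--     # Like A, mutates pick_put in place and returns it.
--     seen = set()
--     out = []
--     for p in reversed(pick_put):
--         k = (p[0], p[1])
--         if k not in seen:
--             seen.add(k)
--             out.append(p)
--     out.reverse()
--     pick_put[:] = out
--     return pick_put
-- ===== Notes on version B (the rewrite author's own statement) =====
-- stated objective: faster
-- what changed: A repeatedly rescans the whole list (quadratic count pass) to pop one earlier duplicate at a time; B does a single backward pass with a seen-set, keeping the last occurrence of each key, then reverses.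
import Mathlib
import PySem

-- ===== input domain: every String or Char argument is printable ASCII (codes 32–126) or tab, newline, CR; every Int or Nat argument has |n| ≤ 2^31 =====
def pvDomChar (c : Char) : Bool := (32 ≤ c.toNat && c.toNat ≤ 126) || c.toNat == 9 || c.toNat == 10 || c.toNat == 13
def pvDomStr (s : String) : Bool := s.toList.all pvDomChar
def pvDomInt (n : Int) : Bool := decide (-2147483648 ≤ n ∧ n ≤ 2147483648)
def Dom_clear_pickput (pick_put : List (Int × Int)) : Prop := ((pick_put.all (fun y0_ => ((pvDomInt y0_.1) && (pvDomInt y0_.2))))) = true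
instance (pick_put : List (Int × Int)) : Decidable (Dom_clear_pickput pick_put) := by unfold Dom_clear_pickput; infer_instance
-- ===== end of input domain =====

-- B deduplicates by (p[0], p[1]) keeping the last occurrence in one backward pass with a seen-set,
-- instead of A's repeated full-list count scans that pop one earlier duplicate per round (objective: faster).
-- Both Pythons mutate pick_put in place and return it; the equivalence proved here is about the RETURN value.

-- ===== PORT A =====
-- inner helper find_count: count[i] = #{pp | pp agrees with pick_put[i] on both coords}; q = 1 if some count[i] > 1 (break) else 0
def cntPair (l : List (Int × Int)) (p : Int × Int) : Int :=
  l.foldl (fun s pp => if p.1 == pp.1 && p.2 == pp.2 then s + 1 else s) 0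

-- the q-loop: 'for i in range(len(count)): if count[i]>1: q+=1; break'
def qOf : List Int → Int
  | [] => 0
  | c :: cs => if c > 1 then 1 else qOf cs

def find_count (l : List (Int × Int)) : List Int × Int :=
  (l.map (cntPair l), qOf (l.map (cntPair l)))

-- 'for i in range(len(count)): if count[i]>1: pick_put.pop(i); break'
def popDup : List Int → List (Int × Int) → List (Int × Int)
  | c :: cs, x :: xs => if c > 1 then xs else x :: popDup cs xs
  | _, xs => xs

-- closed form of the pop loop, needed for the termination argument of the while-loop below
theorem popDup_eq (f : (Int × Int) → Int) (xs : List (Int × Int)) :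
    popDup (xs.map f) xs =
      xs.takeWhile (fun x => !decide (f x > 1)) ++ (xs.dropWhile (fun x => !decide (f x > 1))).tail := by
  induction xs with
  | nil => rfl
  | cons x xs ih =>
    by_cases h : f x > 1 <;>
      simp [popDup, h, ih]

theorem qOf_lt_one_iff (cs : List Int) : qOf cs < 1 ↔ ∀ c ∈ cs, ¬ 1 < c := by
  induction cs with
  | nil => simp [qOf]
  | cons c cs ih =>
    by_cases h : c > 1
    · simp only [qOf, if_pos h]
      constructor
      · omega
      · intro hc; exact absurd h (hc c (List.mem_cons_self))
    · simp only [qOf, if_neg h, ih, List.mem_cons]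
      constructor
      · intro hc y hy
        rcases hy with rfl | hy
        · omega
        · exact hc y hy
      · intro hc y hy; exact hc y (Or.inr hy)

-- the termination fact the recursion cites: if after the pop q is still ≥ 1, the pop really removed an element
theorem popDup_term (l : List (Int × Int))
    (h : ¬ (find_count (popDup (find_count l).1 l)).2 < 1) :
    (popDup (find_count l).1 l).length < l.length := by
  have hp : popDup (find_count l).1 l
      = l.takeWhile (fun x => !decide (cntPair l x > 1)) ++ (l.dropWhile (fun x => !decide (cntPair l x > 1))).tail :=
    popDup_eq (cntPair l) l
  rw [hp] at h ⊢
  rcases hdw : l.dropWhile (fun x => !decide (cntPair l x > 1)) with _ | ⟨y, ys⟩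
  · exfalso
    have hl : l.takeWhile (fun x => !decide (cntPair l x > 1)) = l := by
      have := List.takeWhile_append_dropWhile (p := fun x => !decide (cntPair l x > 1)) (l := l)
      rw [hdw] at this; simpa using this
    rw [hdw, hl] at h
    simp only [List.tail_nil, List.append_nil] at h
    apply h
    rw [find_count, qOf_lt_one_iff]
    intro c hc
    simp only [List.mem_map] at hc
    obtain ⟨x, hx, rfl⟩ := hc
    have := List.dropWhile_eq_nil_iff.mp hdw x hx
    simpa using this
  · simp only [List.tail_cons]
    have hsplit := List.takeWhile_append_dropWhile (p := fun x => !decide (cntPair l x > 1)) (l := l)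
    rw [hdw] at hsplit
    have hlen := congrArg List.length hsplit
    simp only [List.length_append, List.length_cons] at hlen
    simp only [List.length_append]
    omega

-- the 'while True' loop
def clear_pickput (pick_put : List (Int × Int)) : List (Int × Int) :=
  let l' := popDup (find_count pick_put).1 pick_put
  if (find_count l').2 < 1 then l' else clear_pickput l'
termination_by pick_put.length
decreasing_by exact popDup_term pick_put (by assumption)

-- ===== PORT B =====
-- the 'for p in reversed(pick_put)' loop of Source B, with state (seen, out)
def bLoop : List (Int × Int) → PySem.Set (Int × Int) → List (Int × Int) → PySem.Set (Int × Int) × List (Int × Int)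
  | [], seen, out => (seen, out)
  | p :: rest, seen, out =>
    let k := (p.1, p.2)
    if !PySem.Set.contains seen k then bLoop rest (PySem.Set.add seen k) (out ++ [p])
    else bLoop rest seen out

def clear_pickput_alt (pick_put : List (Int × Int)) : List (Int × Int) :=
  (bLoop pick_put.reverse PySem.Set.empty []).2.reverse

-- ===== PRECONDITION & SPEC =====
def Spec_clear_pickput (pick_put : List (Int × Int)) (out : List (Int × Int)) : Prop := out = clear_pickput_alt pick_put
instance (pick_put : List (Int × Int)) (out : List (Int × Int)) : Decidable (Spec_clear_pickput pick_put out) := by unfold Spec_clear_pickput; infer_instance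

-- ===== CLAIM (what is proved, stated in full; the proofs are below) =====
def Claim_equal_clear_pickput : Prop := ∀ (pick_put : List (Int × Int)), Dom_clear_pickput pick_put → Spec_clear_pickput pick_put (clear_pickput pick_put)

-- ===== LEMMAS AND PROOFS =====

-- keep the last occurrence of each element, additionally dropping elements with pr = true
def keepLastB (pr : (Int × Int) → Bool) : List (Int × Int) → List (Int × Int)
  | [] => []
  | x :: l => if x ∈ l ∨ pr x = true then keepLastB pr l else x :: keepLastB pr l

def keepLast : List (Int × Int) → List (Int × Int) := keepLastB (fun _ => false)

theorem keepLastB_congr (pr pr' : (Int × Int) → Bool) (h : ∀ y, pr y = pr' y) (l : List (Int × Int)) :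
    keepLastB pr l = keepLastB pr' l := by
  induction l with
  | nil => rfl
  | cons x l ih => simp [keepLastB, h, ih]

theorem keepLastB_snoc (pr : (Int × Int) → Bool) (l : List (Int × Int)) (x : Int × Int) :
    keepLastB pr (l ++ [x]) =
      keepLastB (fun y => pr y || decide (y = x)) l ++ (if pr x = true then [] else [x]) := by
  induction l with
  | nil => by_cases h : pr x = true <;> simp [keepLastB, h]
  | cons y l ih =>
    rw [List.cons_append]
    by_cases h : y ∈ l ∨ y = x ∨ pr y = true
    · have h1 : (y ∈ l ++ [x] ∨ pr y = true) := by
        rcases h with h | h | h <;> simp [h]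
      have h2 : (y ∈ l ∨ (pr y || decide (y = x)) = true) := by
        rcases h with h | h | h <;> simp [h]
      simp only [keepLastB]
      rw [if_pos h1, if_pos h2, ih]
    · push_neg at h
      have h1 : ¬ (y ∈ l ++ [x] ∨ pr y = true) := by simp [h.1, h.2.1, h.2.2]
      have h2 : ¬ (y ∈ l ∨ (pr y || decide (y = x)) = true) := by simp [h.1, h.2.1, h.2.2]
      simp only [keepLastB]
      rw [if_neg h1, if_neg h2, ih, List.cons_append]

theorem keepLastB_mid (pr : (Int × Int) → Bool) (pre suf : List (Int × Int)) (x : Int × Int)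
    (hx : x ∈ suf) :
    keepLastB pr (pre ++ x :: suf) = keepLastB pr (pre ++ suf) := by
  induction pre with
  | nil => simp [keepLastB, hx]
  | cons y pre ih =>
    have hmem : (y ∈ pre ++ x :: suf ∨ pr y = true) ↔ (y ∈ pre ++ suf ∨ pr y = true) := by
      constructor
      · rintro (h | h)
        · simp only [List.mem_append, List.mem_cons] at h
          rcases h with h | rfl | h
          · simp [h]
          · simp [hx]
          · simp [h]
        · exact Or.inr h
      · rintro (h | h)
        · simp only [List.mem_append] at h
          rcases h with h | h <;> simp [h]
        · exact Or.inr h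
    rw [List.cons_append, List.cons_append]
    by_cases h : y ∈ pre ++ suf ∨ pr y = true
    · simp only [keepLastB]
      rw [if_pos (hmem.mpr h), if_pos h, ih]
    · simp only [keepLastB]
      rw [if_neg (fun hc => h (hmem.mp hc)), if_neg h, ih]

theorem keepLast_of_nodup (l : List (Int × Int)) (h : l.Nodup) : keepLast l = l := by
  unfold keepLast
  induction l with
  | nil => rfl
  | cons x l ih =>
    rw [List.nodup_cons] at h
    rw [keepLastB, if_neg (by simp [h.1]), ih h.2]


-- cntPair counts occurrences (pairwise coordinate equality IS pair equality)
theorem cntPair_aux (p : Int × Int) (l : List (Int × Int)) (s : Int) :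
    l.foldl (fun s pp => if p.1 == pp.1 && p.2 == pp.2 then s + 1 else s) s = s + (l.count p : Int) := by
  induction l generalizing s with
  | nil => simp
  | cons x l ih =>
    rw [List.foldl_cons]
    by_cases h : p = x
    · subst h
      rw [if_pos (by simp), ih, List.count_cons_self]
      push_cast; ring
    · have h1 : ¬(p.1 == x.1 && p.2 == x.2) = true := by
        simp only [Bool.and_eq_true, beq_iff_eq]
        intro hc; exact h (Prod.ext hc.1 hc.2)
      rw [if_neg h1, ih, List.count_cons_of_ne (Ne.symm h)]

theorem cntPair_eq_count (l : List (Int × Int)) (p : Int × Int) : cntPair l p = (l.count p : Int) := by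
  rw [cntPair, cntPair_aux]
  ring

theorem q_lt_one_nodup (l : List (Int × Int)) (h : (find_count l).2 < 1) : l.Nodup := by
  rw [find_count] at h
  rw [qOf_lt_one_iff] at h
  rw [List.nodup_iff_count_le_one]
  intro a
  by_cases ha : a ∈ l
  · have := h _ (List.mem_map_of_mem ha)
    rw [cntPair_eq_count] at this
    omega
  · simp [List.count_eq_zero_of_not_mem ha]

-- one round of A's while-loop preserves keepLast
theorem keepLast_popDup (l : List (Int × Int)) :
    keepLast (popDup (find_count l).1 l) = keepLast l := by
  have he : (find_count l).1 = l.map (cntPair l) := rfl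
  rw [he, popDup_eq]
  rcases hdw : l.dropWhile (fun x => !decide (cntPair l x > 1)) with _ | ⟨y, ys⟩
  · have hl : l.takeWhile (fun x => !decide (cntPair l x > 1)) = l := by
      have := List.takeWhile_append_dropWhile (p := fun x => !decide (cntPair l x > 1)) (l := l)
      rw [hdw] at this; simpa using this
    simp only [List.tail_nil, List.append_nil, hl]
  · have hsplit := List.takeWhile_append_dropWhile (p := fun x => !decide (cntPair l x > 1)) (l := l)
    rw [hdw] at hsplit
    have hy : ¬ (!decide (cntPair l y > 1)) = true := by
      have := List.head?_dropWhile_not (p := fun x => !decide (cntPair l x > 1)) (l := l)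
      rw [hdw] at this; simpa using this
    have hcnt : 1 < l.count y := by
      rw [cntPair_eq_count] at hy
      simp at hy; exact_mod_cast hy
    have hynotin : y ∉ l.takeWhile (fun x => !decide (cntPair l x > 1)) := by
      intro hc
      have := List.mem_takeWhile_imp hc
      exact hy this
    have hyys : y ∈ ys := by
      have hcl : l.count y = (l.takeWhile (fun x => !decide (cntPair l x > 1))).count y + (y :: ys).count y := by
        rw [← List.count_append, hsplit]
      rw [List.count_eq_zero_of_not_mem hynotin, List.count_cons_self] at hcl
      have : 0 < ys.count y := by omega
      exact List.count_pos_iff.mp this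
    simp only [List.tail_cons]
    conv_rhs => rw [← hsplit]
    exact (keepLastB_mid _ _ _ _ hyys).symm

theorem A_eq_keepLast (l : List (Int × Int)) : clear_pickput l = keepLast l := by
  induction hn : l.length using Nat.strong_induction_on generalizing l with
  | _ n ih =>
    subst hn
    rw [clear_pickput]
    by_cases hq : (find_count (popDup (find_count l).1 l)).2 < 1
    · rw [if_pos hq]
      rw [← keepLast_popDup l]
      exact (keepLast_of_nodup _ (q_lt_one_nodup _ hq)).symm
    · rw [if_neg hq]
      have hlt := popDup_term l hq
      rw [ih _ hlt _ rfl, keepLast_popDup]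

-- B computes keepLast too
theorem bLoop_spec (xs : List (Int × Int)) (s : PySem.Set (Int × Int)) (out : List (Int × Int)) :
    (bLoop xs s out).2 = out ++ (keepLastB (fun y => PySem.Set.contains s y) xs.reverse).reverse := by
  induction xs generalizing s out with
  | nil => simp [bLoop, keepLastB]
  | cons p xs ih =>
    have hk : (p.1, p.2) = p := rfl
    by_cases hc : PySem.Set.contains s p = true
    · have hrev : keepLastB (fun y => PySem.Set.contains s y) ((p :: xs).reverse)
          = keepLastB (fun y => PySem.Set.contains s y) xs.reverse := by
        rw [List.reverse_cons, keepLastB_snoc]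
        rw [hc]
        rw [keepLastB_congr (pr' := fun y => PySem.Set.contains s y)]
        · simp
        · intro y
          by_cases hy : y = p
          · subst hy; rw [hc]; simp
          · simp [hy]
      rw [bLoop]
      simp only [hk, hc, Bool.not_true, Bool.false_eq_true, if_false]
      rw [ih, hrev]
    · have hrev : keepLastB (fun y => PySem.Set.contains s y) ((p :: xs).reverse)
          = keepLastB (fun y => PySem.Set.contains (PySem.Set.add s p) y) xs.reverse ++ [p] := by
        rw [List.reverse_cons, keepLastB_snoc]
        rw [Bool.not_eq_true] at hc
        rw [hc]
        simp only [Bool.false_eq_true, if_false]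
        congr 1
        apply keepLastB_congr
        intro y
        have : (PySem.Set.contains (PySem.Set.add s p) y = true) ↔ (PySem.Set.contains s y || decide (y = p)) = true := by
          simp only [PySem.Set.contains_iff, Bool.or_eq_true, decide_eq_true_eq, PySem.Set.mem_add, PySem.Set.contains_iff]
        exact Bool.eq_iff_iff.mpr this.symm
      rw [bLoop]
      simp only [hk, hc, Bool.not_false, if_true]
      rw [ih, hrev]
      simp
theorem B_eq_keepLast (l : List (Int × Int)) : clear_pickput_alt l = keepLast l := by
  rw [clear_pickput_alt, bLoop_spec]
  simp only [List.nil_append, List.reverse_reverse]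
  rw [keepLast]
  apply keepLastB_congr
  intro y
  rfl

-- ===== VERDICT (by name: the statement is the Claim_ definition above) =====
theorem clear_pickput_spec : Claim_equal_clear_pickput := by
  intro l _
  unfold Spec_clear_pickput
  rw [A_eq_keepLast, B_eq_keepLast]
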